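-- pv_equiv track=rewrite | github.com/social-link-analytics-group-bsc/tw_coronavirus | src/utils/location_detector.py | __get_emoji_codes
-- ===== SOURCE A (Python) =====
-- def __get_emoji_codes(demojized_location):
--     emoji_codes = []
--     in_potential_emoji_code = False
--     for char in demojized_location:
--         if char == ':':
--             if in_potential_emoji_code:
--                 in_potential_emoji_code = False
--                 emoji_code += char
--                 emoji_codes.append(emoji_code)
--             else:
--                 in_potential_emoji_code = True
--                 emoji_code = char
--         else:
--             if in_potential_emoji_code:
--                 emoji_code += char
--     return emoji_codes
-- ===== SOURCE B (Python) =====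
-- import re
--
-- def __get_emoji_codes(demojized_location):
--     return re.findall(r':[^:]*:', demojized_location)
-- ===== Notes on version B (the rewrite author's own statement) =====
-- stated objective: idiomatic
-- what changed: Replaced the hand-written character-by-character state machine with a single regex call re.findall(r':[^:]*:', s), which performs the same alternating-colon pairing in one library call.
import Mathlib
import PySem

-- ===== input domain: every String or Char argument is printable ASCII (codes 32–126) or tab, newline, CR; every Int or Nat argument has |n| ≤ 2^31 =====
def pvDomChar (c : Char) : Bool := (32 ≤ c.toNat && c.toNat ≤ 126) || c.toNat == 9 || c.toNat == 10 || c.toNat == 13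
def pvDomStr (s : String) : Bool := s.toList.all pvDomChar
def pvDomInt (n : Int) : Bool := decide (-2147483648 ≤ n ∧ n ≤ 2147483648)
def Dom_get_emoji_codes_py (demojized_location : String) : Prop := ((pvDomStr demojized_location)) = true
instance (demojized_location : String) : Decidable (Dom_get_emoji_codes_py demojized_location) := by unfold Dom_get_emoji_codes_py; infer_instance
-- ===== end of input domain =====

-- B replaces A's hand-written colon state machine with one regex call re.findall(r':[^:]*:', s) (idiomatic; equal output everywhere).


-- ===== PORT A =====
-- state: (collected codes, current emoji_code if in_potential_emoji_code else none);
-- emoji_code is kept as a List Char in order of append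
def pvStepA (st : List String × Option (List Char)) (c : Char) : List String × Option (List Char) :=
  if c = ':' then
    match st.2 with
    | some acc => (st.1 ++ [String.ofList (acc ++ [c])], none)
    | none => (st.1, some [c])
  else
    match st.2 with
    | some acc => (st.1, some (acc ++ [c]))
    | none => st

def get_emoji_codes_py (demojized_location : String) : List String :=
  (demojized_location.toList.foldl pvStepA ([], none)).1

-- ===== PORT B =====
-- B is `re.findall(r':[^:]*:', s)`: for this pattern findall is exactly the following
-- left-to-right non-overlapping scan (exact: [^:]* takes the maximal colon-free run,
-- matching resumes right after the closing colon).
mutual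
def pvScanB : List Char → List String
  | [] => []
  | c :: rest => if c = ':' then pvTakeB rest [] else pvScanB rest
termination_by l => l.length

def pvTakeB : List Char → List Char → List String
  | [], _ => []
  | c :: rest, acc =>
      if c = ':' then String.ofList (':' :: (acc ++ [':'])) :: pvScanB rest
      else pvTakeB rest (acc ++ [c])
termination_by l _ => l.length
end

def get_emoji_codes_py_alt (demojized_location : String) : List String :=
  pvScanB demojized_location.toList

-- ===== PRECONDITION & SPEC =====
def Spec_get_emoji_codes_py (demojized_location : String) (out : List String) : Prop := out = get_emoji_codes_py_alt demojized_location
instance (demojized_location : String) (out : List String) : Decidable (Spec_get_emoji_codes_py demojized_location out) := by unfold Spec_get_emoji_codes_py; infer_instance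

-- ===== CLAIM (what is proved, stated in full; the proofs are below) =====
def Claim_equal_get_emoji_codes_py : Prop := ∀ (demojized_location : String), Dom_get_emoji_codes_py demojized_location → Spec_get_emoji_codes_py demojized_location (get_emoji_codes_py demojized_location)

-- ===== LEMMAS AND PROOFS =====
-- loop invariant: A's fold from state (codes, none) produces codes ++ pvScanB l,
-- and from (codes, some (':' :: body)) produces codes ++ pvTakeB l body.
theorem pvFoldA_eq (l : List Char) :
    (∀ codes, (List.foldl pvStepA (codes, none) l).1 = codes ++ pvScanB l) ∧
    (∀ codes body, (List.foldl pvStepA (codes, some (':' :: body)) l).1 = codes ++ pvTakeB l body) := by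
  induction l with
  | nil => simp [pvScanB, pvTakeB]
  | cons c rest ih =>
    constructor
    · intro codes
      by_cases hc : c = ':'
      · simp [hc, pvScanB, pvStepA, ih.2 codes []]
      · simp [hc, pvScanB, pvStepA, ih.1 codes]
    · intro codes body
      by_cases hc : c = ':'
      · simp [hc, pvTakeB, pvStepA, ih.1]
      · have := ih.2 codes (body ++ [c])
        simp [hc, pvTakeB, pvStepA] at this ⊢
        simpa using this

-- ===== VERDICT (by name: the statement is the Claim_ definition above) =====
theorem get_emoji_codes_py_spec : Claim_equal_get_emoji_codes_py := by
  intro s _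
  show get_emoji_codes_py s = get_emoji_codes_py_alt s
  simpa [get_emoji_codes_py, get_emoji_codes_py_alt] using (pvFoldA_eq s.toList).1 []
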